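-- pv_equiv track=rewrite | github.com/hnnsb/AdventOfCode2023 | 13/13.py | check_rows
-- ===== SOURCE A (Python) =====
-- import functools
--
-- def check_rows(pattern):
--     index_sets = []
--     for row in pattern:
--         indexes = set()
--         for c in range(1, len(row)):
--             left, right = row[:c], row[c:]
--             left = left[::-1]
--             mirror = True
--             for dc in range(min(len(left), len(right))):
--                 if left[dc] != right[dc]:
--                     mirror = False
--                     break
--             if mirror:
--                 indexes.add(c)
--         index_sets.append(indexes)
--
--     same = functools.reduce(lambda x, y: x.intersection(y), index_sets)
--     if len(same) > 0:
--         return same.pop()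
--     else:
--         return 0
-- ===== SOURCE B (Python) =====
-- def _mirrors_at(row, c):
--     if c >= len(row):
--         return False
--     k = min(c, len(row) - c)
--     return all(row[c - 1 - i] == row[c + i] for i in range(k))
--
--
-- def check_rows(pattern):
--     first = pattern[0]
--     for c in range(1, len(first)):
--         if all(_mirrors_at(row, c) for row in pattern):
--             return c
--     return 0
-- ===== Notes on version B (the rewrite author's own statement) =====
-- stated objective: simpler
-- what changed: B drops the per-row mirror-index sets, the reduce-intersection and set.pop entirely: it scans candidate mirror columns of the first row left to right, tests each column directly against every row by in-place index comparison (no slicing/reversal/set building), stopping at the first failing row and returning the first column all rows accept.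
-- outside the precondition, e.g. on check_rows([]): A raises TypeError, B raises IndexError; on check_rows(['babaabbbb']): A returns 8, B returns 7; on check_rows(['aaaa']): A returns 1, B returns 1
import Mathlib
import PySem

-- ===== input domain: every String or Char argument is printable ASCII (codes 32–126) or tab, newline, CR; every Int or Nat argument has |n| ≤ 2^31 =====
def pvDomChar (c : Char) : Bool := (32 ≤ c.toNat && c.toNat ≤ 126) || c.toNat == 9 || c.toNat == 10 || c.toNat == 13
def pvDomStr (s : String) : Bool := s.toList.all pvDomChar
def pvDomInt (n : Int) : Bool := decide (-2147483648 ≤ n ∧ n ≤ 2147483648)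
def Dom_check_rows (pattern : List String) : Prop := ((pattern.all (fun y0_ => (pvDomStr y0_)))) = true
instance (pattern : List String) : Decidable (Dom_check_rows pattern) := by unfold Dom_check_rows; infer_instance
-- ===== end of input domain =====

-- B replaces A's per-row mirror-index sets + reduce-intersection + set.pop by a direct left-to-right
-- scan of the first row's candidate mirror columns, returning the first column every row accepts (simpler).


-- ===== PORT A =====
-- inner loop "for dc in range(min(len(left), len(right))): if left[dc] != right[dc]: mirror=False; break"
def pvInnerA (left right : List Char) : List Int → Bool
  | [] => true
  | dc :: rest =>
      if PySem.List.pyGet? left dc ≠ PySem.List.pyGet? right dc then false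
      else pvInnerA left right rest

-- the body of the loop over c: "left, right = row[:c], row[c:]; left = left[::-1]; mirror = …"
def pvMirrorBoolA (row : List Char) (c : Int) : Bool :=
  let left := PySem.List.slice row none (some c)
  let right := PySem.List.slice row (some c) none
  let left := left.reverse
  pvInnerA left right (PySem.List.pyRange 0 (min left.length right.length : Nat) 1)

def pvRowA (row : String) : PySem.Set Int :=
  (PySem.List.pyRange 1 (row.toList.length : Int) 1).foldl
    (fun indexes c => if pvMirrorBoolA row.toList c then PySem.Set.add indexes c else indexes)
    PySem.Set.empty

def check_rows (pattern : List String) : Int :=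
  let index_sets : List (PySem.Set Int) := pattern.foldl (fun acc row => acc ++ [pvRowA row]) []
  let same : PySem.Set Int :=
    match index_sets with
    | [] => PySem.Set.empty          -- functools.reduce on [] raises TypeError: excluded by Pre_
    | x :: xs => xs.foldl PySem.Set.inter x
  if same.length > 0 then
    same.headD 0                     -- same.pop(): hash order is not modelled; under Pre_ `same` has at
                                     -- most one element, where taking the head is exact
  else 0

-- ===== PORT B =====
def pvMirrorsAtB (row : List Char) (c : Nat) : Bool :=
  if row.length ≤ c then false
  else
    let k := min c (row.length - c)
    (List.range k).all (fun i => row.getD (c - 1 - i) ' ' == row.getD (c + i) ' ')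

def check_rows_alt (pattern : List String) : Int :=
  let first := (pattern.headD "").toList   -- pattern[0]; raises IndexError on []: excluded by Pre_
  match (List.range' 1 (first.length - 1)).find?
      (fun c => pattern.all (fun row => pvMirrorsAtB row.toList c)) with
  | some c => (c : Int)
  | none => 0

-- ===== PRECONDITION & SPEC =====
-- "column c is a mirror column of row r" (checkable form, used by Pre_)
def pvMirrorChk (r : List Char) (c : Nat) : Bool :=
  decide (c < r.length) &&
    (List.range (min c (r.length - c))).all (fun i => r.getD (c - 1 - i) ' ' == r.getD (c + i) ' ')

-- "column c (1 ≤ c) is a mirror column of every row" (checkable form, used by Pre_)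
def pvCommonChk (pattern : List String) (c : Nat) : Bool :=
  decide (1 ≤ c) && pattern.all (fun r => pvMirrorChk r.toList c)

-- Pre_ excludes the empty pattern (A's reduce raises TypeError there) and patterns with more than one
-- mirror column common to all rows, where the element A's same.pop() returns is a CPython hash-table
-- iteration-order artefact and neither choice is specified.
def Pre_check_rows (pattern : List String) : Prop :=
  pattern ≠ [] ∧
    (List.range (pattern.headD "").toList.length).countP (fun c => pvCommonChk pattern c) ≤ 1

instance (pattern : List String) : Decidable (Pre_check_rows pattern) := by
  unfold Pre_check_rows; infer_instance

def pvWitness_check_rows : List String := ["#.##..##.", "..#.##.#.", "##......#"]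

def Spec_check_rows (pattern : List String) (out : Int) : Prop := out = check_rows_alt pattern
instance (pattern : List String) (out : Int) : Decidable (Spec_check_rows pattern out) := by
  unfold Spec_check_rows; infer_instance

-- ===== CLAIM (what is proved, stated in full; the proofs are below) =====
def Claim_equal_check_rows : Prop :=
  ∀ (pattern : List String), Dom_check_rows pattern → Pre_check_rows pattern →
    Spec_check_rows pattern (check_rows pattern)

-- ===== LEMMAS AND PROOFS =====

-- Prop forms of the two checkable predicates above
def pvMirrorP (r : List Char) (c : Nat) : Prop :=
  c < r.length ∧ ∀ i < min c (r.length - c), r.getD (c - 1 - i) ' ' = r.getD (c + i) ' '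

def pvCommonCol (pattern : List String) (c : Nat) : Prop :=
  1 ≤ c ∧ ∀ r ∈ pattern, pvMirrorP r.toList c

theorem pvMirrorChk_iff (r : List Char) (c : Nat) :
    pvMirrorChk r c = true ↔ pvMirrorP r c := by
  unfold pvMirrorChk pvMirrorP
  simp [List.all_eq_true]

theorem pvCommonChk_iff (pattern : List String) (c : Nat) :
    pvCommonChk pattern c = true ↔ pvCommonCol pattern c := by
  unfold pvCommonChk pvCommonCol
  simp [List.all_eq_true, pvMirrorChk_iff]

theorem pvInnerA_eq_all (left right : List Char) (l : List Int) :
    pvInnerA left right l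
      = l.all (fun dc => PySem.List.pyGet? left dc == PySem.List.pyGet? right dc) := by
  induction l with
  | nil => rfl
  | cons dc rest ih =>
      simp only [pvInnerA, List.all_cons, ih]
      by_cases h : PySem.List.pyGet? left dc = PySem.List.pyGet? right dc <;> simp [h]

theorem pvMem_foldl_ite_add (p : Int → Bool) (l : List Int) (s : PySem.Set Int) (y : Int) :
    y ∈ l.foldl (fun s c => if p c then PySem.Set.add s c else s) s ↔
      y ∈ s ∨ (y ∈ l ∧ p y = true) := by
  induction l generalizing s with
  | nil => simp
  | cons c rest ih =>
      simp only [List.foldl_cons, ih, List.mem_cons]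
      cases hp : p c with
      | true =>
          rw [if_pos rfl]
          simp only [PySem.Set.mem_add]
          constructor
          · rintro (⟨hy | rfl⟩ | ⟨hl, hpy⟩)
            · exact Or.inl hy
            · exact Or.inr ⟨Or.inl rfl, hp⟩
            · exact Or.inr ⟨Or.inr hl, hpy⟩
          · rintro (hy | ⟨(rfl | hl), hpy⟩)
            · exact Or.inl (Or.inl hy)
            · exact Or.inl (Or.inr rfl)
            · exact Or.inr ⟨hl, hpy⟩
      | false =>
          rw [if_neg (by simp)]
          constructor
          · rintro (hy | ⟨hl, hpy⟩)
            · exact Or.inl hy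
            · exact Or.inr ⟨Or.inr hl, hpy⟩
          · rintro (hy | ⟨(rfl | hl), hpy⟩)
            · exact Or.inl hy
            · exact absurd hpy (by simp [hp])
            · exact Or.inr ⟨hl, hpy⟩

theorem pvMem_foldl_inter (l : List (PySem.Set Int)) (s : PySem.Set Int) (y : Int) :
    y ∈ l.foldl PySem.Set.inter s ↔ y ∈ s ∧ ∀ t ∈ l, y ∈ t := by
  induction l generalizing s with
  | nil => simp
  | cons t rest ih =>
      simp only [List.foldl_cons, ih, PySem.Set.mem_inter, List.mem_cons]
      constructor
      · rintro ⟨⟨hs, ht⟩, hrest⟩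
        refine ⟨hs, ?_⟩
        rintro u (rfl | hu)
        · exact ht
        · exact hrest u hu
      · rintro ⟨hs, hall⟩
        exact ⟨⟨hs, hall t (Or.inl rfl)⟩, fun u hu => hall u (Or.inr hu)⟩

theorem pvFoldl_append_map (f : String → PySem.Set Int) (l : List String) (acc : List (PySem.Set Int)) :
    l.foldl (fun acc row => acc ++ [f row]) acc = acc ++ l.map f := by
  induction l generalizing acc with
  | nil => simp
  | cons r rest ih => simp [ih]

-- A's per-column mirror test equals pvMirrorP, for 1 ≤ n < row.length
theorem pvMirrorBoolA_iff (row : List Char) (n : Nat) (h1 : 1 ≤ n) (h2 : n < row.length) :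
    pvMirrorBoolA row (n : Int) = true ↔ pvMirrorP row n := by
  have hlen : (List.take n row).reverse.length = n := by
    simp [List.length_take, Nat.min_eq_left (Nat.le_of_lt h2)]
  unfold pvMirrorBoolA
  simp only [PySem.List.slice_to_natCast, PySem.List.slice_from_natCast]
  rw [pvInnerA_eq_all]
  rw [PySem.List.pyRange_one]
  simp only [List.all_map, List.all_eq_true, List.mem_range, Function.comp]
  have hk : (((min ((List.take n row).reverse.length) ((List.drop n row).length) : Nat) : Int) - 0).toNat
      = min n (row.length - n) := by
    simp [hlen]; omega
  rw [hk]
  unfold pvMirrorP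
  constructor
  · intro h
    refine ⟨h2, ?_⟩
    intro i hi
    have := h i hi
    have hi1 : i < (List.take n row).reverse.length := by omega
    have hi2 : i < (List.drop n row).length := by simp [List.length_drop]; omega
    rw [show ((0 : Int) + (i : Nat)) = ((i : Nat) : Int) by omega] at this
    rw [PySem.List.pyGet?_natCast, PySem.List.pyGet?_natCast] at this
    rw [List.getElem?_eq_getElem hi1, List.getElem?_eq_getElem hi2] at this
    simp only [beq_iff_eq, Option.some.injEq] at this
    rw [List.getElem_reverse, List.getElem_take, List.getElem_drop] at this
    rw [List.getD_eq_getElem _ _ (by omega), List.getD_eq_getElem _ _ (by omega)]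
    have e1 : (List.take n row).length - 1 - i = n - 1 - i := by
      simp [List.length_take, Nat.min_eq_left (Nat.le_of_lt h2)]
    simp only [e1] at this
    convert this using 2
  · rintro ⟨-, h⟩
    intro i hi
    have hi1 : i < (List.take n row).reverse.length := by omega
    have hi2 : i < (List.drop n row).length := by simp [List.length_drop]; omega
    rw [show ((0 : Int) + (i : Nat)) = ((i : Nat) : Int) by omega]
    rw [PySem.List.pyGet?_natCast, PySem.List.pyGet?_natCast]
    rw [List.getElem?_eq_getElem hi1, List.getElem?_eq_getElem hi2]
    simp only [beq_iff_eq, Option.some.injEq]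
    rw [List.getElem_reverse, List.getElem_take, List.getElem_drop]
    have := h i hi
    rw [List.getD_eq_getElem _ _ (by omega), List.getD_eq_getElem _ _ (by omega)] at this
    have e1 : (List.take n row).length - 1 - i = n - 1 - i := by
      simp [List.length_take, Nat.min_eq_left (Nat.le_of_lt h2)]
    simp only [e1]
    convert this using 2

theorem pvMem_rowA (row : String) (c : Int) :
    c ∈ pvRowA row ↔ ∃ n : Nat, c = (n : Int) ∧ 1 ≤ n ∧ pvMirrorP row.toList n := by
  unfold pvRowA
  rw [pvMem_foldl_ite_add]
  simp only [PySem.Set.empty, List.not_mem_nil, false_or, PySem.List.mem_pyRange_one]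
  constructor
  · rintro ⟨⟨hc1, hc2⟩, hb⟩
    refine ⟨c.toNat, by omega, by omega, ?_⟩
    rw [← pvMirrorBoolA_iff row.toList c.toNat (by omega) (by omega)]
    rwa [show ((c.toNat : Nat) : Int) = c by omega]
  · rintro ⟨n, rfl, hn1, hm⟩
    have hn2 : n < row.toList.length := hm.1
    refine ⟨⟨by omega, by omega⟩, ?_⟩
    rw [pvMirrorBoolA_iff row.toList n hn1 hn2]
    exact hm

theorem pvMirrorsAtB_iff (row : List Char) (c : Nat) :
    pvMirrorsAtB row c = true ↔ pvMirrorP row c := by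
  unfold pvMirrorsAtB pvMirrorP
  by_cases h : row.length ≤ c
  · simp [h]
  · simp only [if_neg h, List.all_eq_true, List.mem_range, beq_iff_eq]
    constructor
    · intro hall; exact ⟨by omega, fun i hi => hall i hi⟩
    · rintro ⟨-, hall⟩; exact fun i hi => hall i hi

-- uniqueness of the common column, extracted from Pre_'s count bound
theorem pvUnique_common (pattern : List String) (hpre : Pre_check_rows pattern)
    (c₁ c₂ : Nat) (h₁ : pvCommonCol pattern c₁) (h₂ : pvCommonCol pattern c₂)
    (hl₁ : c₁ < (pattern.headD "").toList.length) (hl₂ : c₂ < (pattern.headD "").toList.length) :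
    c₁ = c₂ := by
  by_contra hne
  have hsub : [c₁, c₂] ⊆ (List.range (pattern.headD "").toList.length).filter
      (fun c => pvCommonChk pattern c) := by
    intro x hx
    simp only [List.mem_cons, List.not_mem_nil, or_false] at hx
    rcases hx with rfl | rfl
    · simp only [List.mem_filter, List.mem_range]; exact ⟨hl₁, (pvCommonChk_iff _ _).2 h₁⟩
    · simp only [List.mem_filter, List.mem_range]; exact ⟨hl₂, (pvCommonChk_iff _ _).2 h₂⟩
  have hnd : ([c₁, c₂] : List Nat).Nodup := by simp [hne]
  have hle := (hnd.subperm hsub).length_le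
  rw [← List.countP_eq_length_filter] at hle
  have h2 := hpre.2
  simp only [List.length_cons, List.length_nil] at hle
  omega

-- membership in A's intersected set, for pattern = r0 :: rest
theorem pvMem_same (r0 : String) (rest : List String) (c : Int) :
    c ∈ (rest.map pvRowA).foldl PySem.Set.inter (pvRowA r0) ↔
      ∃ n : Nat, c = (n : Int) ∧ pvCommonCol (r0 :: rest) n := by
  rw [pvMem_foldl_inter]
  constructor
  · rintro ⟨h0, hrest⟩
    rcases (pvMem_rowA r0 c).1 h0 with ⟨n, rfl, hn1, hm0⟩
    refine ⟨n, rfl, hn1, ?_⟩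
    intro r hrmem
    rcases List.mem_cons.1 hrmem with rfl | hr
    · exact hm0
    · have := hrest (pvRowA r) (List.mem_map_of_mem hr)
      rcases (pvMem_rowA r _).1 this with ⟨n', hn', -, hm'⟩
      have : n = n' := by omega
      subst this
      exact hm'
  · rintro ⟨n, rfl, hn1, hall⟩
    refine ⟨(pvMem_rowA r0 _).2 ⟨n, rfl, hn1, hall r0 (List.mem_cons_self)⟩, ?_⟩
    intro t ht
    rcases List.mem_map.1 ht with ⟨r, hr, rfl⟩
    exact (pvMem_rowA r _).2 ⟨n, rfl, hn1, hall r (List.mem_cons_of_mem _ hr)⟩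

-- B's per-column predicate equals pvCommonCol, for columns of range' 1 (len₀ - 1)
theorem pvPredB_iff (pattern : List String) (c : Nat) (hc : 1 ≤ c) :
    (pattern.all (fun row => pvMirrorsAtB row.toList c) = true) ↔
      (1 ≤ c ∧ ∀ r ∈ pattern, pvMirrorP r.toList c) := by
  simp only [List.all_eq_true]
  constructor
  · intro h; exact ⟨hc, fun r hr => (pvMirrorsAtB_iff _ _).1 (h r hr)⟩
  · rintro ⟨-, h⟩; exact fun r hr => (pvMirrorsAtB_iff _ _).2 (h r hr)

-- ===== VERDICT (by name: the statement is the Claim_ definition above) =====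
theorem check_rows_spec : Claim_equal_check_rows := by
  intro pattern _ hpre
  obtain ⟨hne, -⟩ := id hpre
  obtain ⟨r0, rest, rfl⟩ : ∃ r0 rest, pattern = r0 :: rest := by
    cases pattern with
    | nil => exact absurd rfl hne
    | cons a l => exact ⟨a, l, rfl⟩
  unfold Spec_check_rows check_rows check_rows_alt
  simp only [pvFoldl_append_map pvRowA (r0 :: rest) [], List.nil_append, List.map_cons,
    List.headD_cons]
  set same := (rest.map pvRowA).foldl PySem.Set.inter (pvRowA r0) with hsame
  have hlen0 : (r0 :: rest).headD "" = r0 := rfl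
  cases hfind : (List.range' 1 (r0.toList.length - 1)).find?
      (fun c => (r0 :: rest).all (fun row => pvMirrorsAtB row.toList c)) with
  | none =>
      rw [List.find?_eq_none] at hfind
      have hnil : same = [] := by
        by_contra hns
        obtain ⟨x, hx⟩ := List.exists_mem_of_ne_nil _ hns
        rcases (pvMem_same r0 rest x).1 hx with ⟨n, rfl, hn1, hall⟩
        have hn2 : n < r0.toList.length := (hall r0 (List.mem_cons_self)).1
        have hmem : n ∈ List.range' 1 (r0.toList.length - 1) := by
          rw [List.mem_range'_1]; omega
        exact hfind n hmem ((pvPredB_iff (r0 :: rest) n hn1).2 ⟨hn1, hall⟩)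
      rw [hnil]
      simp
  | some m =>
      have hmmem := List.mem_of_find?_eq_some hfind
      have hmp := List.find?_some hfind
      rw [List.mem_range'_1] at hmmem
      have hm1 : 1 ≤ m := hmmem.1
      have hcm : pvCommonCol (r0 :: rest) m := (pvPredB_iff (r0 :: rest) m hm1).1 hmp
      have hmem_same : (m : Int) ∈ same := (pvMem_same r0 rest (m : Int)).2 ⟨m, rfl, hcm⟩
      obtain ⟨h, t, hst⟩ : ∃ h t, same = h :: t := by
        cases hs : same with
        | nil => rw [hs] at hmem_same; cases hmem_same
        | cons a l => exact ⟨a, l, rfl⟩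
      rw [hst]
      have hh : h ∈ same := by rw [hst]; exact List.mem_cons_self
      rcases (pvMem_same r0 rest h).1 hh with ⟨nh, rfl, hch⟩
      have hm2 : m < ((r0 :: rest).headD "").toList.length := (hcm.2 r0 (List.mem_cons_self)).1
      have hnh2 : nh < ((r0 :: rest).headD "").toList.length := (hch.2 r0 (List.mem_cons_self)).1
      have : nh = m := pvUnique_common (r0 :: rest) hpre nh m hch hcm hnh2 hm2
      subst this
      simp
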